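-- pv_equiv track=rewrite | github.com/ai-kmu/etc | algorithm/2020/0602/MyungHak.py | solution
-- ===== SOURCE A (Python) =====
-- def solution(input):
--     input.sort()
--     price = 0
--     T = 0
--     for i in input:
--         T += i[0]
--         price += T + 20*i[1]
--     return price
-- ===== SOURCE B (Python) =====
-- def solution(input):
--     input.sort()
--     n = len(input)
--     base = 20 * sum(y for _, y in input)
--     weighted = sum((n - i) * x for i, (x, _) in enumerate(input))
--     return base + weighted
-- ===== Notes on version B (the rewrite author's own statement) =====
-- stated objective: alternative
-- what changed: Replaces A's single pass with a running prefix-sum accumulator by two independent closed-form reductions over the sorted list: 20*sum of second coordinates plus sum of (n-i)*first coordinate, since input[i][0] contributes to every step from i onward.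
import Mathlib
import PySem

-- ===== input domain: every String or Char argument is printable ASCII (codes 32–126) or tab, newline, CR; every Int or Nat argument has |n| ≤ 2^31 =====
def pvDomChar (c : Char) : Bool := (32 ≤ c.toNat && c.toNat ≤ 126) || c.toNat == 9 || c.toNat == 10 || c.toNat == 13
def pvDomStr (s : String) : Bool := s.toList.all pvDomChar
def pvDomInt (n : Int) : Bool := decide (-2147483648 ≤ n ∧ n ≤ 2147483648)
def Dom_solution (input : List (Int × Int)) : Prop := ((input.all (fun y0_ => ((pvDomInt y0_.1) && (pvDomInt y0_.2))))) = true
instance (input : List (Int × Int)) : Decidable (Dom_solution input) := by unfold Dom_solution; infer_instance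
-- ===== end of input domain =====

-- B recomputes A's prefix-sum pass as two independent reductions (20*Σsnd + Σ(n-i)*fst) over the sorted list; same cost, different decomposition. Both A and B sort the input list in place (return-value equivalence is what is proved).


-- ===== PORT A =====
-- input.sort(); then one pass with running prefix sum T and accumulator price
def solution (input : List (Int × Int)) : Int :=
  let s := PySem.List.sorted2 input Prod.fst Prod.snd
  (s.foldl (fun (st : Int × Int) i => (st.1 + (st.2 + i.1) + 20 * i.2, st.2 + i.1)) (0, 0)).1

-- ===== PORT B =====
-- input.sort(); base = 20*sum of seconds; weighted = sum of (n-i)*x over enumerate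
def solution_alt (input : List (Int × Int)) : Int :=
  let s := PySem.List.sorted2 input Prod.fst Prod.snd
  let n : Int := s.length
  let base := 20 * ((s.map (fun p => p.2)).sum)
  let weighted := ((PySem.List.enumerate s 0).map (fun p => (n - p.1) * p.2.1)).sum
  base + weighted

-- ===== PRECONDITION & SPEC =====
def Spec_solution (input : List (Int × Int)) (out : Int) : Prop := out = solution_alt input
instance (input : List (Int × Int)) (out : Int) : Decidable (Spec_solution input out) := by unfold Spec_solution; infer_instance

-- ===== CLAIM (what is proved, stated in full; the proofs are below) =====
def Claim_equal_solution : Prop := ∀ (input : List (Int × Int)), Dom_solution input → Spec_solution input (solution input)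

-- ===== LEMMAS AND PROOFS =====
-- Loop invariant: A's fold from (price, T) equals price + T*len + 20*Σsnd + Σ(n-i)*fst,
-- for any start offset s of the enumeration with n = s + len.
theorem pv_loop_eq (l : List (Int × Int)) (n s price T : Int) (hn : n = s + l.length) :
    (l.foldl (fun (st : Int × Int) i => (st.1 + (st.2 + i.1) + 20 * i.2, st.2 + i.1)) (price, T)).1
      = price + T * l.length + 20 * ((l.map (fun p => p.2)).sum)
        + ((PySem.List.enumerate l s).map (fun p => (n - p.1) * p.2.1)).sum := by
  induction l generalizing s price T with
  | nil => simp [PySem.List.enumerate_nil]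
  | cons a l ih =>
    simp only [List.foldl_cons, PySem.List.enumerate_cons, List.map_cons, List.sum_cons,
      List.length_cons]
    obtain rfl : n = s + 1 + (l.length : Int) := by
      rw [hn]; push_cast [List.length_cons]; ring
    rw [ih (s + 1) _ _ (by ring)]
    push_cast
    ring

-- ===== VERDICT (by name: the statement is the Claim_ definition above) =====
theorem solution_spec : Claim_equal_solution := by
  intro input _
  unfold Spec_solution solution solution_alt
  rw [pv_loop_eq _ ((PySem.List.sorted2 input Prod.fst Prod.snd).length : Int) 0 0 0 (by simp)]
  ring
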